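-- pv_equiv track=rewrite | github.com/alhassan-hassan/Structy | bloomberg/lastremaining.py | lastRemaining
-- ===== SOURCE A (Python) =====
-- def lastRemaining(n: int) -> int:
--     head = 1
--     step = 1
--     left = True
--
--     while n > 1:
--         # Move head if we're going left or if n is odd when going right
--         if left or n % 2 == 1:
--             head += step
--
--         # Update for the next round
--         n //= 2
--         step *= 2
--         left = not left
--
--     return head
-- ===== SOURCE B (Python) =====
-- def lastRemaining(n: int) -> int:
--     return _left_to_right(n)
--
-- def _left_to_right(n: int) -> int:
--     if n <= 1:
--         return 1
--     return 2 * _right_to_left(n // 2)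
--
-- def _right_to_left(n: int) -> int:
--     if n <= 1:
--         return 1
--     if n % 2 == 1:
--         return 2 * _left_to_right(n // 2)
--     return 2 * _left_to_right(n // 2) - 1
-- ===== Notes on version B (the rewrite author's own statement) =====
-- stated objective: alternative
-- what changed: Replaced A's iterative loop threading head/step/left state by the mutually recursive divide-and-conquer pair leftToRight/rightToLeft recursing on the halved problem.
import Mathlib
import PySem

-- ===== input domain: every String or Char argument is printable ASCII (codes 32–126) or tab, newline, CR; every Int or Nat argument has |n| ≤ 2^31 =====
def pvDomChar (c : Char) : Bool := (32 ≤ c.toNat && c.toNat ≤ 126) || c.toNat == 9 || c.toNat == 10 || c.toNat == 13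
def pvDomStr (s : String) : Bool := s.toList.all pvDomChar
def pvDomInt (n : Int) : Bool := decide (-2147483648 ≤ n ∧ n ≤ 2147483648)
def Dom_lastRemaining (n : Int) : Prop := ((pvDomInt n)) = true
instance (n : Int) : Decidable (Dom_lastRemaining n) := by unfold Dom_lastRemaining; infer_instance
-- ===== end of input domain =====

-- B replaces A's head/step/left loop by the mutually recursive divide-and-conquer
-- (leftToRight/rightToLeft) decomposition of the same elimination game; objective: alternative.

-- ===== PORT A =====
-- A's while loop, threading the state (n, head, step, left).
def lastRemainingLoop (n head step : Int) (left : Bool) : Int :=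
  if _h : n > 1 then
    lastRemainingLoop (PySem.Int.floordiv n 2)
      (if left || (PySem.Int.mod n 2 == 1) then head + step else head)
      (step * 2) (!left)
  else head
termination_by n.toNat
decreasing_by
  simp only [PySem.Int.floordiv_eq_ediv_of_pos (by omega : (0:Int) < 2)]
  omega

def lastRemaining (n : Int) : Int := lastRemainingLoop n 1 1 true

-- ===== PORT B =====
mutual
def leftToRight (n : Int) : Int :=
  if _h : n ≤ 1 then 1
  else 2 * rightToLeft (PySem.Int.floordiv n 2)
termination_by n.toNat
decreasing_by
  simp only [PySem.Int.floordiv_eq_ediv_of_pos (by omega : (0:Int) < 2)]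
  omega

def rightToLeft (n : Int) : Int :=
  if _h : n ≤ 1 then 1
  else if PySem.Int.mod n 2 == 1 then 2 * leftToRight (PySem.Int.floordiv n 2)
  else 2 * leftToRight (PySem.Int.floordiv n 2) - 1
termination_by n.toNat
decreasing_by
  all_goals
    simp only [PySem.Int.floordiv_eq_ediv_of_pos (by omega : (0:Int) < 2)]
    omega
end

def lastRemaining_alt (n : Int) : Int := leftToRight n

-- ===== PRECONDITION & SPEC =====
def Spec_lastRemaining (n : Int) (out : Int) : Prop := out = lastRemaining_alt n
instance (n : Int) (out : Int) : Decidable (Spec_lastRemaining n out) := by unfold Spec_lastRemaining; infer_instance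

-- ===== CLAIM (what is proved, stated in full; the proofs are below) =====
def Claim_equal_lastRemaining : Prop := ∀ (n : Int), Dom_lastRemaining n → Spec_lastRemaining n (lastRemaining n)

-- ===== LEMMAS AND PROOFS =====

theorem leftToRight_base {n : Int} (h : n ≤ 1) : leftToRight n = 1 := by
  rw [leftToRight]; simp [h]

theorem leftToRight_step {n : Int} (h : 1 < n) : leftToRight n = 2 * rightToLeft (n / 2) := by
  rw [leftToRight, dif_neg (by omega : ¬ n ≤ 1),
    PySem.Int.floordiv_eq_ediv_of_pos (by omega : (0:Int) < 2)]

theorem rightToLeft_step_odd {n : Int} (h : 1 < n) (ho : n % 2 = 1) :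
    rightToLeft n = 2 * leftToRight (n / 2) := by
  rw [rightToLeft, dif_neg (by omega : ¬ n ≤ 1)]
  rw [PySem.Int.mod_eq_emod_of_pos (by omega : (0:Int) < 2),
    PySem.Int.floordiv_eq_ediv_of_pos (by omega : (0:Int) < 2)]
  simp [ho]

theorem rightToLeft_step_even {n : Int} (h : 1 < n) (he : n % 2 = 0) :
    rightToLeft n = 2 * leftToRight (n / 2) - 1 := by
  rw [rightToLeft, dif_neg (by omega : ¬ n ≤ 1)]
  rw [PySem.Int.mod_eq_emod_of_pos (by omega : (0:Int) < 2),
    PySem.Int.floordiv_eq_ediv_of_pos (by omega : (0:Int) < 2)]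
  simp [he]

theorem rightToLeft_base {n : Int} (h : n ≤ 1) : rightToLeft n = 1 := by
  rw [rightToLeft]; simp [h]

-- Invariant relating A's loop state to B's divide-and-conquer values.
theorem loop_eq_dc (k : Nat) : ∀ (n head step : Int) (left : Bool), n.toNat ≤ k →
    lastRemainingLoop n head step left =
      head + step * ((if left then leftToRight n else rightToLeft n) - 1) := by
  induction k with
  | zero =>
    intro n head step left hk
    have hn : ¬ n > 1 := by omega
    rw [lastRemainingLoop]
    simp [hn, leftToRight_base (by omega : n ≤ 1), rightToLeft_base (by omega : n ≤ 1)]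
  | succ k ih =>
    intro n head step left hk
    by_cases hn : n > 1
    · have h2 : PySem.Int.floordiv n 2 = n / 2 :=
        PySem.Int.floordiv_eq_ediv_of_pos (by omega)
      have hm : PySem.Int.mod n 2 = n % 2 :=
        PySem.Int.mod_eq_emod_of_pos (by omega)
      have hrec : (n / 2).toNat ≤ k := by omega
      rw [lastRemainingLoop]
      simp only [hn, dif_pos, h2, hm]
      rw [ih (n / 2) _ _ (!left) hrec]
      cases left with
      | true =>
        rw [leftToRight_step hn]
        simp
        ring
      | false =>
        by_cases hodd : n % 2 = 1
        · rw [rightToLeft_step_odd hn hodd]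
          simp [hodd]
          ring
        · have he : n % 2 = 0 := by omega
          rw [rightToLeft_step_even hn he]
          simp [he]
          ring
    · rw [lastRemainingLoop]
      simp [hn, leftToRight_base (by omega : n ≤ 1), rightToLeft_base (by omega : n ≤ 1)]

-- ===== VERDICT (by name: the statement is the Claim_ definition above) =====
theorem lastRemaining_spec : Claim_equal_lastRemaining := by
  intro n _
  unfold Spec_lastRemaining lastRemaining lastRemaining_alt
  rw [loop_eq_dc n.toNat n 1 1 true le_rfl]
  simp
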